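-- pv_equiv track=rewrite | github.com/Usama113/Regex-Test | Regex.py | regex_form
-- ===== SOURCE A (Python) =====
-- def input_type(i):#to check the type of input
--     if(ord(i)>=48 and ord(i)<=57):
--         return 1;
--     elif((ord(i)>=65 and ord(i)<=90) or (ord(i)>=97 and ord(i)<=122)):
--         return 2;
--     else:
--         return 3;
--
-- def regex_form(ls):
--     delimeter='.'
--     ls=ls.split('.')
--     reg_temp=''
--     digits_temp=''
--     pattern_temp=[]
--     count=1
--     temp=ls[0]
--     i=len(ls)
--     for j in range(1,i):
--         if(ls[j]==temp):
--             count=count+1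
--         else:
--             if(input_type(temp[-1])==3):
--                 reg_temp = reg_temp + temp+delimeter
--                 digits_temp=digits_temp+str(-1)+delimeter
--                 pattern_temp.append(-1)
--             else:
--                 if(temp[-1]=='w'):
--                     pattern_temp.append(2)
--                 elif(temp[-1]=='d'):
--                     pattern_temp.append(1)
--                 #reg_temp=reg_temp+temp+'{'+str(count)+'}'
--                 reg_temp = reg_temp + temp+delimeter
--                 digits_temp=digits_temp+str(count)+delimeter
--             count=1
--             temp=ls[j]
--
--     return reg_temp,digits_temp,pattern_temp
-- ===== SOURCE B (Python) =====
-- def input_type(i):  # to check the type of input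
--     if(ord(i)>=48 and ord(i)<=57):
--         return 1;
--     elif((ord(i)>=65 and ord(i)<=90) or (ord(i)>=97 and ord(i)<=122)):
--         return 2;
--     else:
--         return 3;
--
-- def regex_form(ls):
--     # phase 1: run-length encode the dot-split tokens into (token, count) pairs
--     runs = []
--     for t in ls.split('.'):
--         if runs and runs[-1][0] == t:
--             runs[-1] = (t, runs[-1][1] + 1)
--         else:
--             runs.append((t, 1))
--     runs = runs[:-1]  # the final run is never emitted
--     # phase 2: render the three outputs independently from the run list
--     reg = ''.join(t + '.' for t, _ in runs)
--     counts = [-1 if input_type(t[-1]) == 3 else c for t, c in runs]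
--     digits = ''.join(str(c) + '.' for c in counts)
--     pattern = []
--     for t, _ in runs:
--         if input_type(t[-1]) == 3:
--             pattern.append(-1)
--         elif t[-1] == 'w':
--             pattern.append(2)
--         elif t[-1] == 'd':
--             pattern.append(1)
--     return reg, digits, pattern
-- ===== Notes on version B (the rewrite author's own statement) =====
-- stated objective: idiomatic
-- what changed: A's single fused index loop that interleaves run counting with output building is replaced by a two-phase decomposition: first run-length-encode the dot-split tokens into a (token, count) list, drop the never-emitted final run, then render the regex string, the digits string and the pattern list independently from that run list.
import Mathlib
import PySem

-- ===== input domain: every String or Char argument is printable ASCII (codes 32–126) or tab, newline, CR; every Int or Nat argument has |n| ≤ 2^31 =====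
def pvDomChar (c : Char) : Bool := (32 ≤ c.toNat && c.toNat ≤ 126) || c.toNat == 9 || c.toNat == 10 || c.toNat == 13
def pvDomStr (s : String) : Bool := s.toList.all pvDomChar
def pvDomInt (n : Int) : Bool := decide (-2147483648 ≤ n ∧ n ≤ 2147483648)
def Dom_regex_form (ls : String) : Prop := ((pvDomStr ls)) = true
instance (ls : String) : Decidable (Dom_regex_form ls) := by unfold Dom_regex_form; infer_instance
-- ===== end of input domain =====

-- B replaces A's fused index loop by a two-phase decomposition (build the (token, run-length)
-- list first, then render the three outputs independently); same complexity, no speed claim.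
-- ===== PORT A =====
def input_type (i : Char) : Int :=
  if 48 ≤ i.toNat ∧ i.toNat ≤ 57 then 1
  else if (65 ≤ i.toNat ∧ i.toNat ≤ 90) ∨ (97 ≤ i.toNat ∧ i.toNat ≤ 122) then 2
  else 3

-- loop body of A; `none` = the IndexError of temp[-1] on an empty token
def regexStepA (ls : List (List Char))
    (st : Option (List Char × List Char × List Int × Int × List Char)) (j : Int) :
    Option (List Char × List Char × List Int × Int × List Char) :=
  match st with
  | none => none
  | some (reg, dig, pat, count, temp) =>
    match PySem.List.pyGet? ls j with
    | none => none
    | some lsj =>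
      if lsj = temp then some (reg, dig, pat, count + 1, temp)
      else
        match PySem.Chars.pyGet? temp (-1) with
        | none => none
        | some c =>
          if input_type c = 3 then
            some (reg ++ temp ++ ['.'], dig ++ PySem.Int.toChars (-1) ++ ['.'], pat ++ [-1], 1, lsj)
          else
            some (reg ++ temp ++ ['.'], dig ++ PySem.Int.toChars count ++ ['.'],
              (if c = 'w' then pat ++ [2] else if c = 'd' then pat ++ [1] else pat), 1, lsj)

def regex_form (ls : String) : String × String × List Int :=
  let tokens := PySem.Chars.splitOn ls.toList ['.']
  let temp := tokens.headD []
  let st := (PySem.List.pyRange 1 (tokens.length : Int)).foldl (regexStepA tokens)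
      (some ([], [], [], 1, temp))
  match st with
  | some (reg, dig, pat, _, _) => (String.ofList reg, String.ofList dig, pat)
  | none => ("", "", [])

-- ===== PORT B =====
def regexRunStep (runs : List (List Char × Int)) (t : List Char) : List (List Char × Int) :=
  match runs.getLast? with
  | some (s, c) => if s = t then runs.dropLast ++ [(s, c + 1)] else runs ++ [(t, 1)]
  | none => runs ++ [(t, 1)]

def regexCount (p : List Char × Int) (c : Char) : Int :=
  if input_type c = 3 then -1 else p.2

def regex_form_alt (ls : String) : String × String × List Int :=
  let tokens := PySem.Chars.splitOn ls.toList ['.']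
  let runs := (tokens.foldl regexRunStep []).dropLast
  let reg := PySem.Chars.join [] (runs.map (fun p => p.1 ++ ['.']))
  -- `none` = the IndexError of t[-1] on an empty token
  let counts : Option (List Int) := runs.foldr (fun p acc =>
      match PySem.Chars.pyGet? p.1 (-1), acc with
      | some c, some l => some (regexCount p c :: l)
      | _, _ => none) (some [])
  match counts with
  | none => ("", "", [])
  | some cs =>
    let dig := PySem.Chars.join [] (cs.map (fun c => PySem.Int.toChars c ++ ['.']))
    let pat := runs.foldl (fun pat p =>
        match PySem.Chars.pyGet? p.1 (-1) with
        | some c =>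
          if input_type c = 3 then pat ++ [-1]
          else if c = 'w' then pat ++ [2]
          else if c = 'd' then pat ++ [1]
          else pat
        | none => pat) []
    (String.ofList reg, String.ofList dig, pat)

-- ===== PRECONDITION & SPEC =====
-- Pre_ excludes exactly the inputs where A raises IndexError: an empty dot-split token
-- followed by a different (nonempty) token makes A index the last character of an empty token.
def Pre_regex_form (ls : String) : Prop :=
  List.IsChain (fun a b => a = [] → b = []) (PySem.Chars.splitOn ls.toList ['.'])
instance (ls : String) : Decidable (Pre_regex_form ls) := by unfold Pre_regex_form; infer_instance
def pvWitness_regex_form : String := "ab.ab.7.7.7.#.x"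

def Spec_regex_form (ls : String) (out : String × String × List Int) : Prop := out = regex_form_alt ls
instance (ls : String) (out : String × String × List Int) : Decidable (Spec_regex_form ls out) := by unfold Spec_regex_form; infer_instance

-- ===== CLAIM (what is proved, stated in full; the proofs are below) =====
def Claim_equal_regex_form : Prop := ∀ (ls : String), Dom_regex_form ls → Pre_regex_form ls → Spec_regex_form ls (regex_form ls)

-- ===== LEMMAS AND PROOFS =====

-- the run list both programs implicitly build: current run (t, c), remaining tokens
def runsAux (t : List Char) (c : Int) : List (List Char) → List (List Char × Int)
  | [] => [(t, c)]
  | x :: xs => if x = t then runsAux t (c + 1) xs else (t, c) :: runsAux x 1 xs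

theorem runsAux_ne_nil (t : List Char) (c : Int) (xs : List (List Char)) :
    runsAux t c xs ≠ [] := by
  induction xs generalizing t c with
  | nil => simp [runsAux]
  | cons x xs ih => simp only [runsAux]; split <;> simp [ih]

-- A's loop body with the token already fetched
def stepA' (st : Option (List Char × List Char × List Int × Int × List Char)) (x : List Char) :
    Option (List Char × List Char × List Int × Int × List Char) :=
  match st with
  | none => none
  | some (reg, dig, pat, count, temp) =>
    if x = temp then some (reg, dig, pat, count + 1, temp)
    else
      match PySem.Chars.pyGet? temp (-1) with
      | none => none
      | some c =>
        if input_type c = 3 then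
          some (reg ++ temp ++ ['.'], dig ++ PySem.Int.toChars (-1) ++ ['.'], pat ++ [-1], 1, x)
        else
          some (reg ++ temp ++ ['.'], dig ++ PySem.Int.toChars count ++ ['.'],
            (if c = 'w' then pat ++ [2] else if c = 'd' then pat ++ [1] else pat), 1, x)

-- emitting one closed run onto the three accumulators
def emitStep (st : Option (List Char × List Char × List Int)) (p : List Char × Int) :
    Option (List Char × List Char × List Int) :=
  match st with
  | none => none
  | some (reg, dig, pat) =>
    match PySem.Chars.pyGet? p.1 (-1) with
    | none => none
    | some c =>
      if input_type c = 3 then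
        some (reg ++ p.1 ++ ['.'], dig ++ PySem.Int.toChars (-1) ++ ['.'], pat ++ [-1])
      else
        some (reg ++ p.1 ++ ['.'], dig ++ PySem.Int.toChars p.2 ++ ['.'],
          (if c = 'w' then pat ++ [2] else if c = 'd' then pat ++ [1] else pat))

def extract5 (st : Option (List Char × List Char × List Int × Int × List Char)) :
    String × String × List Int :=
  match st with
  | some (reg, dig, pat, _, _) => (String.ofList reg, String.ofList dig, pat)
  | none => ("", "", [])

def extract3 (st : Option (List Char × List Char × List Int)) : String × String × List Int :=
  match st with
  | some (reg, dig, pat) => (String.ofList reg, String.ofList dig, pat)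
  | none => ("", "", [])

theorem foldl_stepA'_none (xs : List (List Char)) : xs.foldl stepA' none = none := by
  induction xs with
  | nil => rfl
  | cons x xs ih => simpa [stepA'] using ih

theorem foldl_emitStep_none (xs : List (List Char × Int)) : xs.foldl emitStep none = none := by
  induction xs with
  | nil => rfl
  | cons x xs ih => simpa [emitStep] using ih

-- A's index loop is the structural fold over the remaining tokens
theorem foldA_drop (ts : List (List Char)) (d : List (List Char)) :
    ∀ (k : Nat) st, ts.drop k = d →
      (PySem.List.pyRange (k : Int) (ts.length : Int)).foldl (regexStepA ts) st
        = d.foldl stepA' st := by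
  induction d with
  | nil =>
    intro k st hd
    have hk : ts.length ≤ k := by
      by_contra h
      have := List.drop_eq_nil_iff.mp hd
      omega
    have : PySem.List.pyRange (k : Int) (ts.length : Int) = [] := by
      simp [PySem.List.pyRange]; omega
    simp [this]
  | cons x xs ih =>
    intro k st hd
    have hk : k < ts.length := by
      by_contra h
      rw [List.drop_eq_nil_iff.mpr (by omega)] at hd
      simp at hd
    have hx : ts[k]? = some x := by
      have h0 : (List.drop k ts)[0]? = ts[k + 0]? := List.getElem?_drop
      simpa [hd] using h0.symm
    rw [PySem.List.pyRange_one_cons (by exact_mod_cast hk)]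
    rw [List.foldl_cons]
    have hstep : regexStepA ts st (k : Int) = stepA' st x := by
      cases st with
      | none => rfl
      | some s =>
        obtain ⟨reg, dig, pat, count, temp⟩ := s
        simp [regexStepA, stepA', PySem.List.pyGet?_natCast, hx]
    have hcast : ((k : Int) + 1) = ((k + 1 : Nat) : Int) := by push_cast; ring
    rw [hstep, hcast, ih (k + 1) (stepA' st x) (by
        have h1 := congrArg (List.drop 1) hd
        rw [List.drop_drop] at h1
        simpa [Nat.add_comm] using h1),
      List.foldl_cons]

-- A's structural fold computes the emit-fold over the closed runs
theorem mainA (rest : List (List Char)) :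
    ∀ (reg dig : List Char) (pat : List Int) (c : Int) (temp : List Char),
      extract5 (rest.foldl stepA' (some (reg, dig, pat, c, temp)))
        = extract3 ((runsAux temp c rest).dropLast.foldl emitStep (some (reg, dig, pat))) := by
  induction rest with
  | nil => intro reg dig pat c temp; simp [runsAux, extract5, extract3]
  | cons x xs ih =>
    intro reg dig pat c temp
    by_cases hx : x = temp
    · subst hx
      simp only [List.foldl_cons, stepA', runsAux]
      exact ih reg dig pat (c + 1) x
    · simp only [List.foldl_cons, runsAux, if_neg hx,
        List.dropLast_cons_of_ne_nil (runsAux_ne_nil x 1 xs)]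
      cases hget : PySem.Chars.pyGet? temp (-1) with
      | none =>
        simp only [stepA', if_neg hx, hget, emitStep]
        rw [foldl_stepA'_none, foldl_emitStep_none]
        rfl
      | some ch =>
        by_cases h3 : input_type ch = 3
        · simp only [stepA', if_neg hx, hget, if_pos h3, emitStep]
          exact ih _ _ _ 1 x
        · simp only [stepA', if_neg hx, hget, if_neg h3, emitStep]
          exact ih _ _ _ 1 x

-- the rendered pieces of one closed run
def regOf (p : List Char × Int) : List Char := p.1 ++ ['.']
def digOf (p : List Char × Int) : List Char :=
  match PySem.Chars.pyGet? p.1 (-1) with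
  | some c => PySem.Int.toChars (regexCount p c) ++ ['.']
  | none => []
def patOf (p : List Char × Int) : List Int :=
  match PySem.Chars.pyGet? p.1 (-1) with
  | some c => if input_type c = 3 then [-1]
      else if c = 'w' then [2] else if c = 'd' then [1] else []
  | none => []
def cntOf (p : List Char × Int) : Int :=
  match PySem.Chars.pyGet? p.1 (-1) with
  | some c => regexCount p c
  | none => 0

theorem pyGet?_neg_one_ne_none (cs : List Char) (h : cs ≠ []) :
    ∃ c, PySem.Chars.pyGet? cs (-1) = some c := by
  have hlen : 0 < cs.length := List.length_pos_iff.mpr h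
  refine ⟨cs[cs.length - 1]'(by omega), ?_⟩
  simp only [PySem.Chars.pyGet?_eq_listPyGet?, PySem.List.pyGet?, PySem.List.pyIdx?]
  rw [if_neg (by omega), if_pos (by omega)]
  simp [Option.bind]

-- the emit-fold succeeds and is the concatenation of the per-run pieces
theorem foldl_emit_some (runs : List (List Char × Int)) (hne : ∀ q ∈ runs, q.1 ≠ []) :
    ∀ (reg dig : List Char) (pat : List Int),
      runs.foldl emitStep (some (reg, dig, pat))
        = some (reg ++ (runs.map regOf).flatten, dig ++ (runs.map digOf).flatten,
            pat ++ (runs.map patOf).flatten) := by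
  induction runs with
  | nil => intro reg dig pat; simp
  | cons q rest ih =>
    intro reg dig pat
    obtain ⟨c, hc⟩ := pyGet?_neg_one_ne_none q.1 (hne q (by simp))
    have hrest : ∀ p ∈ rest, p.1 ≠ [] := fun p hp => hne p (by simp [hp])
    have hemit : emitStep (some (reg, dig, pat)) q
        = some (reg ++ regOf q, dig ++ digOf q, pat ++ patOf q) := by
      simp only [emitStep, regOf, digOf, patOf, regexCount, hc]
      split_ifs <;> simp
    rw [List.foldl_cons, hemit, ih hrest]
    simp

-- Pre_ makes every closed run's token nonempty
theorem runsAux_dropLast_ne_nil (rest : List (List Char)) :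
    ∀ (t : List Char) (c : Int), List.IsChain (fun a b => a = [] → b = []) (t :: rest) →
      ∀ q ∈ (runsAux t c rest).dropLast, q.1 ≠ [] := by
  induction rest with
  | nil => intro t c _ q hq; simp [runsAux] at hq
  | cons x xs ih =>
    intro t c hch q hq
    obtain ⟨h1, hch'⟩ := List.isChain_cons.mp hch
    have htx : t = [] → x = [] := by simpa using h1
    by_cases hx : x = t
    · subst hx
      simp only [runsAux] at hq
      exact ih x (c + 1) hch' q hq
    · simp only [runsAux, if_neg hx,
        List.dropLast_cons_of_ne_nil (runsAux_ne_nil x 1 xs)] at hq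
      rw [List.mem_cons] at hq
      rcases hq with rfl | hq
      · intro habs
        exact hx ((htx habs).trans habs.symm)
      · exact ih x 1 hch' q hq

-- B's run-building fold is runsAux
theorem foldl_runStep (xs : List (List Char)) :
    ∀ (init : List (List Char × Int)) (t : List Char) (c : Int),
      xs.foldl regexRunStep (init ++ [(t, c)]) = init ++ runsAux t c xs := by
  induction xs with
  | nil => intro init t c; simp [runsAux]
  | cons x xs ih =>
    intro init t c
    by_cases hx : x = t
    · subst hx
      simp only [List.foldl_cons, regexRunStep, List.getLast?_concat,
        List.dropLast_concat, runsAux]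
      exact ih init x (c + 1)
    · have hne : ¬ (t = x) := fun h => hx h.symm
      simp only [List.foldl_cons, regexRunStep, List.getLast?_concat, if_neg hne, runsAux,
        if_neg hx, List.append_assoc, List.cons_append, List.nil_append]
      have := ih (init ++ [(t, c)]) x 1
      simpa using this

-- B's counts fold succeeds with the per-run counts
theorem counts_eq (runs : List (List Char × Int)) (hne : ∀ q ∈ runs, q.1 ≠ []) :
    runs.foldr (fun p acc =>
        match PySem.Chars.pyGet? p.1 (-1), acc with
        | some c, some l => some (regexCount p c :: l)
        | _, _ => none) (some [])
      = some (runs.map cntOf) := by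
  induction runs with
  | nil => rfl
  | cons q rest ih =>
    obtain ⟨c, hc⟩ := pyGet?_neg_one_ne_none q.1 (hne q (by simp))
    have hc' : PySem.List.pyGet? q.1 (-1) = some c := by simpa using hc
    rw [List.foldr_cons, ih (fun p hp => hne p (by simp [hp])), List.map_cons]
    simp [hc', cntOf]

-- B's pattern fold is the concatenation of the per-run pattern pieces
theorem pattern_eq (runs : List (List Char × Int)) :
    ∀ pat : List Int,
      runs.foldl (fun pat p =>
          match PySem.Chars.pyGet? p.1 (-1) with
          | some c =>
            if input_type c = 3 then pat ++ [-1]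
            else if c = 'w' then pat ++ [2]
            else if c = 'd' then pat ++ [1]
            else pat
          | none => pat) pat
        = pat ++ (runs.map patOf).flatten := by
  induction runs with
  | nil => intro pat; simp
  | cons q rest ih =>
    intro pat
    rw [List.foldl_cons, ih]
    cases hc : PySem.Chars.pyGet? q.1 (-1) with
    | none =>
      have hc' : PySem.List.pyGet? q.1 (-1) = none := by simpa using hc
      simp [patOf, hc']
    | some c =>
      have hc' : PySem.List.pyGet? q.1 (-1) = some c := by simpa using hc
      simp only [hc']
      split_ifs <;> simp_all [patOf]

theorem join_nil_flatten (ps : List (List Char)) : PySem.Chars.join [] ps = ps.flatten := by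
  induction ps with
  | nil => simp [PySem.Chars.join_nil]
  | cons p rest ih =>
    cases rest with
    | nil => simp [PySem.Chars.join_singleton]
    | cons q t => rw [PySem.Chars.join_cons_cons]; simp_all

-- per-run digits piece is the rendered count
theorem digOf_eq (q : List Char × Int) (h : q.1 ≠ []) :
    digOf q = PySem.Int.toChars (cntOf q) ++ ['.'] := by
  obtain ⟨c, hc⟩ := pyGet?_neg_one_ne_none q.1 h
  have hc' : PySem.List.pyGet? q.1 (-1) = some c := by simpa using hc
  simp [digOf, cntOf, hc']

-- ===== VERDICT (by name: the statement is the Claim_ definition above) =====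
theorem regex_form_spec : Claim_equal_regex_form := by
  intro ls _ hpre
  unfold Spec_regex_form
  unfold Pre_regex_form at hpre
  unfold regex_form regex_form_alt
  cases htk : PySem.Chars.splitOn ls.toList ['.'] with
  | nil => simp
  | cons t rest =>
    rw [htk] at hpre
    -- A's side
    have hA : (PySem.List.pyRange (1 : Int) (((t :: rest).length : Nat) : Int)).foldl
        (regexStepA (t :: rest)) (some ([], [], [], 1, (t :: rest).headD []))
        = rest.foldl stepA' (some ([], [], [], 1, t)) := by
      have := foldA_drop (t :: rest) rest 1 (some ([], [], [], 1, t)) (by simp)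
      simpa using this
    have hne := runsAux_dropLast_ne_nil rest t 1 hpre
    have hBruns : (t :: rest).foldl regexRunStep [] = runsAux t 1 rest := by
      have := foldl_runStep rest [] t 1
      simpa [regexRunStep] using this
    set runs := (runsAux t 1 rest).dropLast with hruns
    have hemit := foldl_emit_some runs hne [] [] []
    have hcounts := counts_eq runs hne
    have hAside : extract5 (rest.foldl stepA' (some ([], [], [], 1, t)))
        = (String.ofList (runs.map regOf).flatten, String.ofList (runs.map digOf).flatten,
            (runs.map patOf).flatten) := by
      rw [mainA rest [] [] [] 1 t, ← hruns, hemit]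
      simp [extract3]
    have hdig : (runs.map cntOf).map (fun c => PySem.Int.toChars c ++ ['.'])
        = runs.map digOf := by
      rw [List.map_map]
      exact (List.map_congr_left (fun q hq => (digOf_eq q (hne q hq)).symm))
    simp only [hA, hBruns, ← hruns, hcounts]
    rw [show extract5 (rest.foldl stepA' (some ([], [], [], 1, t)))
        = match rest.foldl stepA' (some ([], [], [], 1, t)) with
          | some (reg, dig, pat, _, _) => (String.ofList reg, String.ofList dig, pat)
          | none => ("", "", []) from rfl] at hAside
    rw [hAside, pattern_eq runs [], join_nil_flatten, join_nil_flatten, hdig]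
    simp
    rfl
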